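-- pv_equiv track=rewrite | github.com/TAIS-NextGen/SympactAI-2025 | Robee/agents/cva_agent.py | _group_similar_skills
-- ===== SOURCE A (Python) =====
-- from typing import Dict, List, Any, Tuple, Optional
--
-- def _group_similar_skills(skills: List[str]) -> List[List[str]]:
--     """Group similar skills together"""
--     skill_groups = []
--     used_skills = set()
--
--     similarity_mapping = {
--         "technical": ["programming", "development", "software", "technical"],
--         "business": ["business", "strategy", "management", "finance"],
--         "creative": ["design", "creative", "visual", "writing"],
--         "marketing": ["marketing", "sales", "promotion"]
--     }
--
--     for group_name, group_skills in similarity_mapping.items():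
--         group = [skill for skill in skills if skill in group_skills and skill not in used_skills]
--         if group:
--             skill_groups.append(group)
--             used_skills.update(group)
--
--     # Add remaining skills as individual groups
--     remaining_skills = [skill for skill in skills if skill not in used_skills]
--     for skill in remaining_skills:
--         skill_groups.append([skill])
--
--     return skill_groups
-- ===== SOURCE B (Python) =====
-- def _group_similar_skills(skills):
--     """Group similar skills together"""
--     similarity_mapping = {
--         "technical": ["programming", "development", "software", "technical"],
--         "business": ["business", "strategy", "management", "finance"],
--         "creative": ["design", "creative", "visual", "writing"],
--         "marketing": ["marketing", "sales", "promotion"]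
--     }
--     # inverted index: keyword -> category
--     index = {kw: cat for cat, kws in similarity_mapping.items() for kw in kws}
--     buckets = {cat: [] for cat in similarity_mapping}
--     remaining = []
--     for skill in skills:
--         cat = index.get(skill)
--         if cat is None:
--             remaining.append(skill)
--         else:
--             buckets[cat].append(skill)
--     return [g for g in buckets.values() if g] + [[s] for s in remaining]
-- ===== Notes on version B (the rewrite author's own statement) =====
-- stated objective: alternative
-- what changed: Replaces the per-category scans over skills plus a used_skills set with an inverted keyword-to-category index and a single pass over skills that routes each skill into its category bucket or the remaining list.
import Mathlib
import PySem

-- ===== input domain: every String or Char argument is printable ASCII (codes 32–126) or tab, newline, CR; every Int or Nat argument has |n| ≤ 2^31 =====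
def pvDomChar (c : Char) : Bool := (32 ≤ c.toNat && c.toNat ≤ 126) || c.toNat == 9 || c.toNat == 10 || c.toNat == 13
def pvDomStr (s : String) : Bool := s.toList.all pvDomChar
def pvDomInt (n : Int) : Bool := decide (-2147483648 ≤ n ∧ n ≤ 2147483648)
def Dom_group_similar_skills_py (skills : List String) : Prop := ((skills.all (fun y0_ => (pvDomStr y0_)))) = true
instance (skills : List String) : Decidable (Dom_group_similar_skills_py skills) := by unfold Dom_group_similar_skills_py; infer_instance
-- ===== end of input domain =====

-- B replaces A's per-category scans over skills (with a used_skills set) by an inverted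
-- keyword→category index and a single pass routing each skill to its bucket or to the
-- remaining list (objective: alternative decomposition, same observable result).

-- the fixed similarity mapping, shared verbatim by both Pythons
def pvSimMap : List (String × List String) :=
  [("technical", ["programming", "development", "software", "technical"]),
   ("business", ["business", "strategy", "management", "finance"]),
   ("creative", ["design", "creative", "visual", "writing"]),
   ("marketing", ["marketing", "sales", "promotion"])]

-- ===== PORT A =====
def group_similar_skills_py (skills : List String) : List (List String) :=
  let st := pvSimMap.foldl
    (fun (st : List (List String) × PySem.Set String) gp =>
      let group := skills.filter (fun s => gp.2.contains s && !(PySem.Set.contains st.2 s))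
      if group ≠ [] then (st.1 ++ [group], PySem.Set.update st.2 group) else st)
    ([], PySem.Set.empty)
  let remaining := skills.filter (fun s => !(PySem.Set.contains st.2 s))
  remaining.foldl (fun gs s => gs ++ [[s]]) st.1

-- ===== PORT B =====
-- B-side helper: index = {kw: cat for cat, kws in similarity_mapping.items() for kw in kws}
def pvIdxB : PySem.Dict String String :=
  pvSimMap.foldl (fun d p => p.2.foldl (fun d kw => d.insert kw p.1) d) PySem.Dict.empty

-- B-side helper: buckets = {cat: [] for cat in similarity_mapping}
def pvBuckets : PySem.Dict String (List String) :=
  pvSimMap.foldl (fun d p => d.insert p.1 ([] : List String)) PySem.Dict.empty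

def group_similar_skills_py_alt (skills : List String) : List (List String) :=
  let st := skills.foldl
    (fun (st : PySem.Dict String (List String) × List String) skill =>
      match PySem.Dict.get? pvIdxB skill with
      | none => (st.1, st.2 ++ [skill])
      | some cat => (st.1.modify cat [] (fun g => g ++ [skill]), st.2))
    (pvBuckets, ([] : List String))
  (st.1.values.filter (fun g => g ≠ [])) ++ st.2.map (fun s => [s])

-- ===== PRECONDITION & SPEC =====
def Spec_group_similar_skills_py (skills : List String) (out : List (List String)) : Prop := out = group_similar_skills_py_alt skills
instance (skills : List String) (out : List (List String)) : Decidable (Spec_group_similar_skills_py skills out) := by unfold Spec_group_similar_skills_py; infer_instance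

-- ===== CLAIM (what is proved, stated in full; the proofs are below) =====
def Claim_equal_group_similar_skills_py : Prop := ∀ (skills : List String), Dom_group_similar_skills_py skills → Spec_group_similar_skills_py skills (group_similar_skills_py skills)

-- ===== LEMMAS AND PROOFS =====

def pvCatNames : List String := ["technical", "business", "creative", "marketing"]

-- the canonical result both ports are proved equal to
def pvCanon (skills : List String) : List (List String) :=
  ((pvSimMap.map (fun m => skills.filter (fun s => m.2.contains s))).filter (fun g => g ≠ []))
    ++ (skills.filter (fun t => !(pvSimMap.any (fun m => m.2.contains t)))).map (fun s => [s])

-- characterisation of lookups in B's inverted index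
set_option maxRecDepth 4096 in
theorem pvIdxB_get (s : String) :
    PySem.Dict.get? pvIdxB s =
      if (["programming", "development", "software", "technical"] : List String).contains s then some "technical"
      else if (["business", "strategy", "management", "finance"] : List String).contains s then some "business"
      else if (["design", "creative", "visual", "writing"] : List String).contains s then some "creative"
      else if (["marketing", "sales", "promotion"] : List String).contains s then some "marketing"
      else none := by
  have h : pvIdxB = PySem.Dict.mk
      [("programming", "technical"), ("development", "technical"), ("software", "technical"), ("technical", "technical"),
       ("business", "business"), ("strategy", "business"), ("management", "business"), ("finance", "business"),
       ("design", "creative"), ("creative", "creative"), ("visual", "creative"), ("writing", "creative"),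
       ("marketing", "marketing"), ("sales", "marketing"), ("promotion", "marketing")] := by decide
  rw [h]
  rcases eq_or_ne s "programming" with rfl | h0
  · decide
  rcases eq_or_ne s "development" with rfl | h1
  · decide
  rcases eq_or_ne s "software" with rfl | h2
  · decide
  rcases eq_or_ne s "technical" with rfl | h3
  · decide
  rcases eq_or_ne s "business" with rfl | h4
  · decide
  rcases eq_or_ne s "strategy" with rfl | h5
  · decide
  rcases eq_or_ne s "management" with rfl | h6
  · decide
  rcases eq_or_ne s "finance" with rfl | h7
  · decide
  rcases eq_or_ne s "design" with rfl | h8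
  · decide
  rcases eq_or_ne s "creative" with rfl | h9
  · decide
  rcases eq_or_ne s "visual" with rfl | h10
  · decide
  rcases eq_or_ne s "writing" with rfl | h11
  · decide
  rcases eq_or_ne s "marketing" with rfl | h12
  · decide
  rcases eq_or_ne s "sales" with rfl | h13
  · decide
  rcases eq_or_ne s "promotion" with rfl | h14
  · decide
  simp [PySem.Dict.get?, List.contains_eq_mem, beq_iff_eq,
    h0, Ne.symm h0, h1, Ne.symm h1, h2, Ne.symm h2, h3, Ne.symm h3, h4, Ne.symm h4,
    h5, Ne.symm h5, h6, Ne.symm h6, h7, Ne.symm h7, h8, Ne.symm h8, h9, Ne.symm h9,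
    h10, Ne.symm h10, h11, Ne.symm h11, h12, Ne.symm h12, h13, Ne.symm h13, h14, Ne.symm h14]

theorem pvIdxB_cat {s c : String} (h : PySem.Dict.get? pvIdxB s = some c) : c ∈ pvCatNames := by
  rw [pvIdxB_get] at h
  split_ifs at h <;> simp_all [pvCatNames]

theorem pvIdxB_isSome (s : String) :
    (PySem.Dict.get? pvIdxB s).isSome = pvSimMap.any (fun m => m.2.contains s) := by
  rcases eq_or_ne s "programming" with rfl | h0
  · decide
  rcases eq_or_ne s "development" with rfl | h1
  · decide
  rcases eq_or_ne s "software" with rfl | h2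
  · decide
  rcases eq_or_ne s "technical" with rfl | h3
  · decide
  rcases eq_or_ne s "business" with rfl | h4
  · decide
  rcases eq_or_ne s "strategy" with rfl | h5
  · decide
  rcases eq_or_ne s "management" with rfl | h6
  · decide
  rcases eq_or_ne s "finance" with rfl | h7
  · decide
  rcases eq_or_ne s "design" with rfl | h8
  · decide
  rcases eq_or_ne s "creative" with rfl | h9
  · decide
  rcases eq_or_ne s "visual" with rfl | h10
  · decide
  rcases eq_or_ne s "writing" with rfl | h11
  · decide
  rcases eq_or_ne s "marketing" with rfl | h12
  · decide
  rcases eq_or_ne s "sales" with rfl | h13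
  · decide
  rcases eq_or_ne s "promotion" with rfl | h14
  · decide
  rw [pvIdxB_get]
  simp [pvSimMap, List.contains_eq_mem, h0, h1, h2, h3, h4, h5, h6, h7, h8, h9, h10, h11, h12, h13, h14]

theorem pvIdxB_eq_tech (s : String) :
    (PySem.Dict.get? pvIdxB s == some "technical")
      = (["programming", "development", "software", "technical"] : List String).contains s := by
  rcases eq_or_ne s "programming" with rfl | h0
  · decide
  rcases eq_or_ne s "development" with rfl | h1
  · decide
  rcases eq_or_ne s "software" with rfl | h2
  · decide
  rcases eq_or_ne s "technical" with rfl | h3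
  · decide
  rcases eq_or_ne s "business" with rfl | h4
  · decide
  rcases eq_or_ne s "strategy" with rfl | h5
  · decide
  rcases eq_or_ne s "management" with rfl | h6
  · decide
  rcases eq_or_ne s "finance" with rfl | h7
  · decide
  rcases eq_or_ne s "design" with rfl | h8
  · decide
  rcases eq_or_ne s "creative" with rfl | h9
  · decide
  rcases eq_or_ne s "visual" with rfl | h10
  · decide
  rcases eq_or_ne s "writing" with rfl | h11
  · decide
  rcases eq_or_ne s "marketing" with rfl | h12
  · decide
  rcases eq_or_ne s "sales" with rfl | h13
  · decide
  rcases eq_or_ne s "promotion" with rfl | h14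
  · decide
  rw [pvIdxB_get]
  simp [List.contains_eq_mem, h0, h1, h2, h3, h4, h5, h6, h7, h8, h9, h10, h11, h12, h13, h14]

theorem pvIdxB_eq_bus (s : String) :
    (PySem.Dict.get? pvIdxB s == some "business")
      = (["business", "strategy", "management", "finance"] : List String).contains s := by
  rcases eq_or_ne s "programming" with rfl | h0
  · decide
  rcases eq_or_ne s "development" with rfl | h1
  · decide
  rcases eq_or_ne s "software" with rfl | h2
  · decide
  rcases eq_or_ne s "technical" with rfl | h3
  · decide
  rcases eq_or_ne s "business" with rfl | h4
  · decide
  rcases eq_or_ne s "strategy" with rfl | h5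
  · decide
  rcases eq_or_ne s "management" with rfl | h6
  · decide
  rcases eq_or_ne s "finance" with rfl | h7
  · decide
  rcases eq_or_ne s "design" with rfl | h8
  · decide
  rcases eq_or_ne s "creative" with rfl | h9
  · decide
  rcases eq_or_ne s "visual" with rfl | h10
  · decide
  rcases eq_or_ne s "writing" with rfl | h11
  · decide
  rcases eq_or_ne s "marketing" with rfl | h12
  · decide
  rcases eq_or_ne s "sales" with rfl | h13
  · decide
  rcases eq_or_ne s "promotion" with rfl | h14
  · decide
  rw [pvIdxB_get]
  simp [List.contains_eq_mem, h0, h1, h2, h3, h4, h5, h6, h7, h8, h9, h10, h11, h12, h13, h14]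

theorem pvIdxB_eq_cre (s : String) :
    (PySem.Dict.get? pvIdxB s == some "creative")
      = (["design", "creative", "visual", "writing"] : List String).contains s := by
  rcases eq_or_ne s "programming" with rfl | h0
  · decide
  rcases eq_or_ne s "development" with rfl | h1
  · decide
  rcases eq_or_ne s "software" with rfl | h2
  · decide
  rcases eq_or_ne s "technical" with rfl | h3
  · decide
  rcases eq_or_ne s "business" with rfl | h4
  · decide
  rcases eq_or_ne s "strategy" with rfl | h5
  · decide
  rcases eq_or_ne s "management" with rfl | h6
  · decide
  rcases eq_or_ne s "finance" with rfl | h7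
  · decide
  rcases eq_or_ne s "design" with rfl | h8
  · decide
  rcases eq_or_ne s "creative" with rfl | h9
  · decide
  rcases eq_or_ne s "visual" with rfl | h10
  · decide
  rcases eq_or_ne s "writing" with rfl | h11
  · decide
  rcases eq_or_ne s "marketing" with rfl | h12
  · decide
  rcases eq_or_ne s "sales" with rfl | h13
  · decide
  rcases eq_or_ne s "promotion" with rfl | h14
  · decide
  rw [pvIdxB_get]
  simp [List.contains_eq_mem, h0, h1, h2, h3, h4, h5, h6, h7, h8, h9, h10, h11, h12, h13, h14]

theorem pvIdxB_eq_mar (s : String) :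
    (PySem.Dict.get? pvIdxB s == some "marketing")
      = (["marketing", "sales", "promotion"] : List String).contains s := by
  rcases eq_or_ne s "programming" with rfl | h0
  · decide
  rcases eq_or_ne s "development" with rfl | h1
  · decide
  rcases eq_or_ne s "software" with rfl | h2
  · decide
  rcases eq_or_ne s "technical" with rfl | h3
  · decide
  rcases eq_or_ne s "business" with rfl | h4
  · decide
  rcases eq_or_ne s "strategy" with rfl | h5
  · decide
  rcases eq_or_ne s "management" with rfl | h6
  · decide
  rcases eq_or_ne s "finance" with rfl | h7
  · decide
  rcases eq_or_ne s "design" with rfl | h8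
  · decide
  rcases eq_or_ne s "creative" with rfl | h9
  · decide
  rcases eq_or_ne s "visual" with rfl | h10
  · decide
  rcases eq_or_ne s "writing" with rfl | h11
  · decide
  rcases eq_or_ne s "marketing" with rfl | h12
  · decide
  rcases eq_or_ne s "sales" with rfl | h13
  · decide
  rcases eq_or_ne s "promotion" with rfl | h14
  · decide
  rw [pvIdxB_get]
  simp [List.contains_eq_mem, h0, h1, h2, h3, h4, h5, h6, h7, h8, h9, h10, h11, h12, h13, h14]

-- ---------- A side ----------

theorem A_fold (skills : List String) (ms : List (String × List String)) :
    ∀ (gs : List (List String)) (u : PySem.Set String),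
      ms.Pairwise (fun a b => ∀ t ∈ a.2, b.2.contains t = false) →
      (∀ t ∈ skills, ∀ m ∈ ms, m.2.contains t = true → PySem.Set.contains u t = false) →
      (ms.foldl
        (fun (st : List (List String) × PySem.Set String) gp =>
          let group := skills.filter (fun s => gp.2.contains s && !(PySem.Set.contains st.2 s))
          if group ≠ [] then (st.1 ++ [group], PySem.Set.update st.2 group) else st)
        (gs, u)).1
        = gs ++ (ms.map (fun m => skills.filter (fun s => m.2.contains s))).filter (fun g => g ≠ []) ∧
      ∀ t ∈ skills,
        PySem.Set.contains
          (ms.foldl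
            (fun (st : List (List String) × PySem.Set String) gp =>
              let group := skills.filter (fun s => gp.2.contains s && !(PySem.Set.contains st.2 s))
              if group ≠ [] then (st.1 ++ [group], PySem.Set.update st.2 group) else st)
            (gs, u)).2 t
          = (PySem.Set.contains u t || ms.any (fun m => m.2.contains t)) := by
  induction ms with
  | nil => intro gs u _ _; simp
  | cons m rest ih =>
    intro gs u hdis hu
    obtain ⟨hhead, htail⟩ := List.pairwise_cons.mp hdis
    have hpred : skills.filter (fun s => m.2.contains s && !(PySem.Set.contains u s))
        = skills.filter (fun s => m.2.contains s) := by
      apply List.filter_congr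
      intro x hx
      cases hc : m.2.contains x
      · simp
      · have hfu := hu x hx m (by simp) hc
        rw [hfu]
        rfl
    rw [List.foldl_cons]
    simp only [hpred]
    by_cases hg : skills.filter (fun s => m.2.contains s) = []
    · have hnone : ∀ t ∈ skills, m.2.contains t = false := by
        intro t ht
        cases hc : m.2.contains t
        · rfl
        · exfalso
          have hmem : t ∈ skills.filter (fun s => m.2.contains s) := List.mem_filter.mpr ⟨ht, hc⟩
          rw [hg] at hmem
          simp at hmem
      rw [if_neg (not_not_intro hg)]
      obtain ⟨ih1, ih2⟩ := ih gs u htail (fun t ht m' hm' hc => hu t ht m' (by simp [hm']) hc)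
      constructor
      · rw [ih1, List.map_cons, List.filter_cons, if_neg (by rw [decide_eq_true_iff]; exact not_not_intro hg)]
      · intro t ht
        rw [ih2 t ht, List.any_cons, hnone t ht]
        simp
    · rw [if_pos hg]
      have hupd : ∀ t ∈ skills,
          PySem.Set.contains (PySem.Set.update u (skills.filter (fun s => m.2.contains s))) t
            = (PySem.Set.contains u t || m.2.contains t) := by
        intro t ht
        cases hx : PySem.Set.contains (PySem.Set.update u (skills.filter (fun s => m.2.contains s))) t
        · have hnm : t ∉ PySem.Set.update u (skills.filter (fun s => m.2.contains s)) := by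
            intro hmem
            have hmt := (PySem.Set.contains_iff _ t).mpr hmem
            rw [hx] at hmt
            simp at hmt
          have h1 : PySem.Set.contains u t = false := by
            cases hc : PySem.Set.contains u t
            · rfl
            · exact absurd ((PySem.Set.mem_update _ _ t).mpr
                (Or.inl ((PySem.Set.contains_iff u t).mp hc))) hnm
          have h2 : m.2.contains t = false := by
            cases hc : m.2.contains t
            · rfl
            · exact absurd ((PySem.Set.mem_update _ _ t).mpr
                (Or.inr (List.mem_filter.mpr ⟨ht, hc⟩))) hnm
          rw [h1, h2]
          rfl
        · have hmem := (PySem.Set.contains_iff _ t).mp hx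
          rcases (PySem.Set.mem_update _ _ t).mp hmem with hmu | hmg
          · rw [(PySem.Set.contains_iff u t).mpr hmu]
            rfl
          · have hcm : m.2.contains t = true := by
              simpa using (List.mem_filter.mp hmg).2
            rw [hcm]
            simp
      have husd : ∀ t ∈ skills, ∀ m' ∈ rest, m'.2.contains t = true →
          PySem.Set.contains (PySem.Set.update u (skills.filter (fun s => m.2.contains s))) t = false := by
        intro t ht m' hm' hc
        rw [hupd t ht]
        have h1 : PySem.Set.contains u t = false := hu t ht m' (by simp [hm']) hc
        have h2 : m.2.contains t = false := by
          cases hcm : m.2.contains t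
          · rfl
          · have htm : t ∈ m.2 := by simpa using hcm
            have hfalse := hhead m' hm' t htm
            rw [hc] at hfalse
            simp at hfalse
        rw [h1, h2]
        rfl
      obtain ⟨ih1, ih2⟩ := ih (gs ++ [skills.filter (fun s => m.2.contains s)])
        (PySem.Set.update u (skills.filter (fun s => m.2.contains s))) htail husd
      constructor
      · rw [ih1, List.map_cons, List.filter_cons, if_pos (decide_eq_true hg),
          List.append_assoc, List.singleton_append]
      · intro t ht
        rw [ih2 t ht, hupd t ht, List.any_cons, Bool.or_assoc]

theorem A_eq (skills : List String) : group_similar_skills_py skills = pvCanon skills := by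
  obtain ⟨h1, h2⟩ := A_fold skills pvSimMap [] PySem.Set.empty (by decide)
    (fun t ht m hm hc => rfl)
  unfold group_similar_skills_py pvCanon
  rw [PySem.List.foldl_append_singleton_eq_map]
  rw [h1]
  simp only [List.nil_append]
  congr 1
  apply congrArg
  apply List.filter_congr
  intro t ht
  rw [h2 t ht]
  simp

-- ---------- B side ----------

theorem B_fold (skills : List String) :
    ∀ (d : PySem.Dict String (List String)) (rem : List String),
      skills.foldl
        (fun (st : PySem.Dict String (List String) × List String) skill =>
          match PySem.Dict.get? pvIdxB skill with
          | none => (st.1, st.2 ++ [skill])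
          | some cat => (st.1.modify cat [] (fun g => g ++ [skill]), st.2))
        (d, rem)
      = (skills.foldl
          (fun d skill =>
            match PySem.Dict.get? pvIdxB skill with
            | none => d
            | some cat => d.modify cat [] (fun g => g ++ [skill])) d,
         rem ++ skills.filter (fun s => !(PySem.Dict.get? pvIdxB s).isSome)) := by
  induction skills with
  | nil => intro d rem; simp
  | cons s rest ih =>
    intro d rem
    cases h : PySem.Dict.get? pvIdxB s <;>
      simp [h, List.foldl_cons, ih]

theorem B_dfold_getD (skills : List String) :
    ∀ (d : PySem.Dict String (List String)) (c : String),
      (skills.foldl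
        (fun d skill =>
          match PySem.Dict.get? pvIdxB skill with
          | none => d
          | some cat => d.modify cat [] (fun g => g ++ [skill])) d).getD c []
      = d.getD c [] ++ skills.filter (fun s => PySem.Dict.get? pvIdxB s == some c) := by
  induction skills with
  | nil => intro d c; simp
  | cons s rest ih =>
    intro d c
    cases h : PySem.Dict.get? pvIdxB s
    · simp [h, ih]
    · rename_i c'
      rw [List.foldl_cons]
      simp only [h]
      rw [ih]
      rw [PySem.Dict.getD_modify]
      by_cases hc : c = c'
      · subst hc
        simp [h, List.append_assoc]
      · simp [h, hc, Ne.symm hc]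

theorem B_dfold_keys (skills : List String) :
    ∀ (d : PySem.Dict String (List String)), d.keys = pvCatNames →
      (skills.foldl
        (fun d skill =>
          match PySem.Dict.get? pvIdxB skill with
          | none => d
          | some cat => d.modify cat [] (fun g => g ++ [skill])) d).keys = pvCatNames := by
  induction skills with
  | nil => intro d h; simpa using h
  | cons s rest ih =>
    intro d h
    cases hg : PySem.Dict.get? pvIdxB s
    · simp only [List.foldl_cons, hg]
      exact ih d h
    · rename_i c
      simp only [List.foldl_cons, hg]
      apply ih
      have hcont : d.contains c = true :=
        (PySem.Dict.contains_iff_mem_keys _ _).mpr (by rw [h]; exact pvIdxB_cat hg)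
      rw [PySem.Dict.keys_modify, PySem.Dict.keys_insert_of_contains _ _ hcont]
      exact h

theorem B_eq (skills : List String) : group_similar_skills_py_alt skills = pvCanon skills := by
  have hB : group_similar_skills_py_alt skills =
      List.filter (fun g => decide (g ≠ []))
        ((skills.foldl
          (fun d skill =>
            match PySem.Dict.get? pvIdxB skill with
            | none => d
            | some cat => d.modify cat [] (fun g => g ++ [skill])) pvBuckets).values)
        ++ List.map (fun s => [s])
            (skills.filter (fun s => !(PySem.Dict.get? pvIdxB s).isSome)) := by
    unfold group_similar_skills_py_alt
    rw [B_fold]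
    rfl
  rw [hB]
  have hkeys := B_dfold_keys skills pvBuckets (by decide)
  rw [PySem.Dict.values_eq_map_keys _ (by rw [hkeys]; decide) ([] : List String)]
  rw [hkeys]
  unfold pvCanon
  simp only [pvCatNames, pvSimMap, List.map_cons, List.map_nil]
  rw [B_dfold_getD, B_dfold_getD, B_dfold_getD, B_dfold_getD]
  have hb : ∀ c ∈ pvCatNames, pvBuckets.getD c [] = [] := by decide
  rw [hb "technical" (by decide), hb "business" (by decide),
      hb "creative" (by decide), hb "marketing" (by decide)]
  simp only [List.nil_append]
  rw [List.filter_congr (fun s _ => pvIdxB_eq_tech s),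
      List.filter_congr (fun s _ => pvIdxB_eq_bus s),
      List.filter_congr (fun s _ => pvIdxB_eq_cre s),
      List.filter_congr (fun s _ => pvIdxB_eq_mar s)]
  congr 1
  apply congrArg
  apply List.filter_congr
  intro t _
  rw [pvIdxB_isSome t]
  simp [pvSimMap]

-- ===== VERDICT (by name: the statement is the Claim_ definition above) =====
theorem group_similar_skills_py_spec : Claim_equal_group_similar_skills_py := by
  intro skills _
  unfold Spec_group_similar_skills_py
  rw [A_eq, B_eq]
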